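-- pv_equiv track=rewrite | github.com/WAnoukh/Hitman_Ia02 | sat.py | count
-- ===== SOURCE A (Python) =====
-- def count(n,k):
--     if k <= 0:
--         return [[]]
--     l = count(n,k-1)
--     nl = []
--     for e in l:
--         for i in range(n):
--             ne = e[:]
--             ne.append(i)
--             nl.append(ne)
--     return nl
-- ===== SOURCE B (Python) =====
-- def count(n, k):
--     # Iterative build: start from [[]] and do k extension passes.
--     result = [[]]
--     for _ in range(k):
--         result = [e + [i] for e in result for i in range(n)]
--     return result
-- ===== Notes on version B (the rewrite author's own statement) =====
-- stated objective: simpler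
-- what changed: Replaced the self-recursion on k by an explicit iterative accumulator: k comprehension passes, each extending every tuple by each i in range(n), in the same order.
import Mathlib
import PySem

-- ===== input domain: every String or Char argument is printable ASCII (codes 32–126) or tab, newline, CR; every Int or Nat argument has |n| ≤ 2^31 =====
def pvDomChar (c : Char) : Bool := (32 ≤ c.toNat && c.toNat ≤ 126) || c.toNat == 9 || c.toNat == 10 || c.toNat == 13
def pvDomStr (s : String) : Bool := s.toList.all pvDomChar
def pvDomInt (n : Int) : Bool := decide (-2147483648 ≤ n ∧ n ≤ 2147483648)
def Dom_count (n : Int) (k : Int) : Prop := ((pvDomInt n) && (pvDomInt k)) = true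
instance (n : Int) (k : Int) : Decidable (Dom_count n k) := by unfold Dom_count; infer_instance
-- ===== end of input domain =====

-- B replaces A's self-recursion on k by an explicit iterative accumulator (k extension passes); same order, same cost.

-- ===== PORT A =====
def count (n : Int) (k : Int) : List (List Int) :=
  if k ≤ 0 then [[]]
  else
    let l := count n (k - 1)
    l.foldl (fun nl e =>
      (PySem.List.pyRange 0 n 1).foldl (fun nl i => nl ++ [e ++ [i]]) nl) []
termination_by k.toNat
decreasing_by omega

-- ===== PORT B =====
def count_alt (n : Int) (k : Int) : List (List Int) :=
  (PySem.List.pyRange 0 k 1).foldl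
    (fun res _ => res.flatMap (fun e => (PySem.List.pyRange 0 n 1).map (fun i => e ++ [i])))
    [[]]

-- ===== PRECONDITION & SPEC =====
-- Pre_ excludes k ≥ 998, on which A's recursion of depth k exceeds CPython's recursion limit and raises RecursionError.
def Pre_count (n : Int) (k : Int) : Prop := k ≤ 997
instance (n : Int) (k : Int) : Decidable (Pre_count n k) := by unfold Pre_count; infer_instance
def pvWitness_count : Int × Int := (2, 3)
def Spec_count (n : Int) (k : Int) (out : List (List Int)) : Prop := out = count_alt n k
instance (n : Int) (k : Int) (out : List (List Int)) : Decidable (Spec_count n k out) := by unfold Spec_count; infer_instance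

-- ===== CLAIM (what is proved, stated in full; the proofs are below) =====
def Claim_equal_count : Prop := ∀ (n : Int) (k : Int), Dom_count n k → Pre_count n k → Spec_count n k (count n k)

-- ===== LEMMAS AND PROOFS =====

theorem count_body (n k : Int) (hk : ¬ k ≤ 0) :
    count n k = (count n (k - 1)).flatMap
      (fun e => (PySem.List.pyRange 0 n 1).map (fun i => e ++ [i])) := by
  rw [count]
  simp only [hk, if_false]
  calc (count n (k-1)).foldl (fun nl e =>
        (PySem.List.pyRange 0 n 1).foldl (fun nl i => nl ++ [e ++ [i]]) nl) []
      = (count n (k-1)).foldl (fun nl e =>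
        nl ++ (PySem.List.pyRange 0 n 1).map (fun i => e ++ [i])) [] := by
        refine PySem.List.foldl_congr_mem _ _ _ _ ?_
        intro acc e _
        exact PySem.List.foldl_append_singleton_eq_map _ _ _
    _ = _ := by
        rw [PySem.List.foldl_append_eq_flatMap]
        simp

theorem count_eq_alt (m : Nat) : ∀ (n k : Int), k.toNat = m → count n k = count_alt n k := by
  induction m with
  | zero =>
      intro n k hk
      have hk0 : k ≤ 0 := by omega
      rw [count, if_pos hk0]
      unfold count_alt
      rw [PySem.List.pyRange_one_eq_nil hk0]
      rfl
  | succ m ih =>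
      intro n k hk
      have hkpos : ¬ k ≤ 0 := by omega
      rw [count_body n k hkpos, ih n (k - 1) (by omega)]
      unfold count_alt
      have hsplit : PySem.List.pyRange 0 k 1
          = PySem.List.pyRange 0 (k - 1) 1 ++ [k - 1] := by
        have h := PySem.List.pyRange_one_succ_right (a := 0) (b := k - 1) (by omega)
        rwa [show k - 1 + 1 = k by omega] at h
      rw [hsplit, List.foldl_append]
      rfl

-- ===== VERDICT (by name: the statement is the Claim_ definition above) =====
theorem count_spec : Claim_equal_count := by
  intro n k _ _
  exact count_eq_alt k.toNat n k rfl
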